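-- pv_equiv track=rewrite | github.com/honu-shell-utions/python | sandbox/xx_project_euler/701-750/714_duodigits02.py | euler_714
-- ===== SOURCE A (Python) =====
-- from itertools import product
--
-- def euler_714(N):
--     candidates = set(range(1,N+1))
--     minimal = {n:0 for n in range(1,N+1)}
--     length = 1
--     while len(candidates) > 0:
--       for i in range(1,10):
--         for j in range(i):
--           for n in product(str(10*i+j), repeat=length):
--             m = int(''.join(tuple(n)))
--             if m == 0:
--               continue
--             for c in candidates:
--               if (minimal[c]==0 or m<minimal[c]) and m%c==0:
--                 minimal[c] = m
--
--       candidates = {c for c in candidates if minimal[c]==0}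
--       length += 1
--     return sum(minimal[n] for n in range(1,N+1))
-- ===== SOURCE B (Python) =====
-- # B: per-n level-synchronous DP over remainders mod n, one table per digit pair,
-- # instead of A's global enumeration of all digit strings of each length.
-- def euler_714(N):
--     total = 0
--     for n in range(1, N + 1):
--         total += _smallest_duodigit_multiple(n)
--     return total
--
-- def _smallest_duodigit_multiple(n):
--     # One DP table per digit pair (i, j), 0 <= j < i <= 9.
--     # After l levels, dp[r] = minimal positive value of a length-l digit string
--     # over {i, j} (leading zeros allowed) whose value is congruent to r mod n.
--     pairs = [(i, j) for i in range(1, 10) for j in range(i)]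
--     dps = []
--     for (i, j) in pairs:
--         dp = {i % n: i}
--         if j != 0:
--             dp[j % n] = j  # j < i, so j wins any remainder collision
--         dps.append(dp)
--     while True:
--         hits = [dp[0] for dp in dps if 0 in dp]
--         if hits:
--             return min(hits)
--         new_dps = []
--         for (i, j), dp in zip(pairs, dps):
--             new = {}
--             for r, v in dp.items():
--                 for d in (i, j):
--                     w = 10 * v + d
--                     rr = w % n
--                     if rr not in new or w < new[rr]:
--                         new[rr] = w
--             if j == 0 and (i % n not in new or i < new[i % n]):
--                 new[i % n] = i  # the all-zeros string extended by i
--             new_dps.append(new)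
--         dps = new_dps
-- ===== Notes on version B (the rewrite author's own statement) =====
-- stated objective: alternative
-- what changed: A enumerates, per digit length L, all 45*2^L digit strings of every pair and trial-divides each surviving n by every candidate; B computes, per n, a remainder DP table mod n for each digit pair (minimal positive string value per residue, advanced one digit per level) and returns the minimum over pairs at the first level whose tables reach residue 0.
import Mathlib
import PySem

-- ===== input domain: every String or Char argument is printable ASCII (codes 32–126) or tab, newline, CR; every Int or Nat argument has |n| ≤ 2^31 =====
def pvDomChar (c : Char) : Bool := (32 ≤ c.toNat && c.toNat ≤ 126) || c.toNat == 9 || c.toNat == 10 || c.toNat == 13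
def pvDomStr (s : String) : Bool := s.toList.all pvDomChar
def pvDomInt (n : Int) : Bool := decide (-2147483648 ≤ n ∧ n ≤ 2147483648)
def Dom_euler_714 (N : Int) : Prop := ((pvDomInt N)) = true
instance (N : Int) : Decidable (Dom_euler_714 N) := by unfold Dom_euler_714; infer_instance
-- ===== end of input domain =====

-- B replaces A's per-length enumeration of all 45·2^L duodigit strings by a per-n
-- remainder DP (one table mod n per digit pair, advanced one digit per level):
-- a genuinely different algorithm of similar practical cost (objective: alternative).

-- ===== PORT A =====

-- itertools.product(cs, repeat=k): leftmost position varies slowest (exact, hand port).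
def pvProduct {α : Type} (cs : List α) : Nat → List (List α)
  | 0 => [[]]
  | n+1 => cs.flatMap (fun c => (pvProduct cs n).map (fun t => c :: t))

-- hand port of int(''.join(tuple(n))): exact here because the joined characters are
-- always ASCII digits (they come from str(10*i+j) with 1 ≤ i ≤ 9, 0 ≤ j < i).
def pvDigitsInt (cs : List Char) : Int :=
  cs.foldl (fun a c => 10 * a + ((c.toNat : Int) - 48)) 0

-- the three nested for-loops of A's while body
def pvAInner (candidates : PySem.Set Int) (minimal : PySem.Dict Int Int) (length : Int) :
    PySem.Dict Int Int :=
  (PySem.List.pyRange 1 10 1).foldl (fun minimal i =>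
    (PySem.List.pyRange 0 i 1).foldl (fun minimal j =>
      (pvProduct (PySem.Int.toChars (10*i+j)) length.toNat).foldl (fun minimal t =>
        let m := pvDigitsInt t
        if m = 0 then minimal
        else candidates.foldl (fun minimal c =>
          if (minimal.getD c 0 = 0 ∨ m < minimal.getD c 0) ∧ PySem.Int.mod m c = 0 then
            minimal.insert c m
          else minimal) minimal) minimal) minimal) minimal

-- A's 'while len(candidates) > 0' loop, made total with fuel (N.toNat + 2 is proven
-- sufficient below: candidates empties after at most max_{1≤c≤N} (c+1) iterations).
def pvALoop : Nat → PySem.Set Int → PySem.Dict Int Int → Int → PySem.Dict Int Int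
  | 0, _, minimal, _ => minimal
  | fuel+1, candidates, minimal, length =>
    if PySem.Set.len candidates > 0 then
      let minimal' := pvAInner candidates minimal length
      let candidates' := PySem.Set.ofList (candidates.filter (fun c => minimal'.getD c 0 == 0))
      pvALoop fuel candidates' minimal' (length + 1)
    else minimal

def euler_714 (N : Int) : Int :=
  let candidates : PySem.Set Int := PySem.Set.ofList (PySem.List.pyRange 1 (N+1) 1)
  let minimal : PySem.Dict Int Int :=
    (PySem.List.pyRange 1 (N+1) 1).foldl (fun d n => d.insert n 0) PySem.Dict.empty
  let final := pvALoop (N.toNat + 2) candidates minimal 1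
  (PySem.List.pyRange 1 (N+1) 1).foldl (fun acc n => acc + final.getD n 0) 0

-- ===== PORT B =====

-- pairs = [(i, j) for i in range(1, 10) for j in range(i)]
def pvPairs : List (Int × Int) :=
  (PySem.List.pyRange 1 10 1).flatMap (fun i => (PySem.List.pyRange 0 i 1).map (fun j => (i, j)))

-- dp = {i % n: i}; if j != 0: dp[j % n] = j
def pvBInit (n i j : Int) : PySem.Dict Int Int :=
  let dp := (PySem.Dict.empty).insert (PySem.Int.mod i n) i
  if j ≠ 0 then dp.insert (PySem.Int.mod j n) j else dp

-- one level of the remainder DP for the pair (i, j)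
def pvBStep (n i j : Int) (dp : PySem.Dict Int Int) : PySem.Dict Int Int :=
  let new := dp.items.foldl (fun new rv =>
      [i, j].foldl (fun new d =>
        let w := 10 * rv.2 + d
        let rr := PySem.Int.mod w n
        if ¬ new.contains rr ∨ w < new.getD rr 0 then new.insert rr w else new) new)
    PySem.Dict.empty
  if j = 0 ∧ (¬ new.contains (PySem.Int.mod i n) ∨ i < new.getD (PySem.Int.mod i n) 0) then
    new.insert (PySem.Int.mod i n) i
  else new

-- B's 'while True' loop, made total with fuel (n.toNat + 2 is proven sufficient below:
-- the pair (1, 0) reaches residue 0 after at most n+1 levels).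
def pvBLoop (n : Int) : Nat → List (PySem.Dict Int Int) → Int
  | 0, _ => 0
  | fuel+1, dps =>
    let hits := dps.foldl (fun acc dp => if dp.contains 0 then acc ++ [dp.getD 0 0] else acc) []
    if hits.length > 0 then (PySem.List.min? hits (fun y => y)).getD 0
    else
      let dps' := (pvPairs.zip dps).foldl (fun acc pd => acc ++ [pvBStep n pd.1.1 pd.1.2 pd.2]) []
      pvBLoop n fuel dps'

def pvBSmallest (n : Int) : Int :=
  let dps := pvPairs.foldl (fun acc p => acc ++ [pvBInit n p.1 p.2]) []
  pvBLoop n (n.toNat + 2) dps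

def euler_714_alt (N : Int) : Int :=
  (PySem.List.pyRange 1 (N+1) 1).foldl (fun total n => total + pvBSmallest n) 0

-- ===== PRECONDITION & SPEC =====
def Spec_euler_714 (N : Int) (out : Int) : Prop := out = euler_714_alt N
instance (N : Int) (out : Int) : Decidable (Spec_euler_714 N out) := by unfold Spec_euler_714; infer_instance

-- ===== CLAIM (what is proved, stated in full; the proofs are below) =====
def Claim_equal_euler_714 : Prop := ∀ (N : Int), Dom_euler_714 N → Spec_euler_714 N (euler_714 N)

-- ===== LEMMAS AND PROOFS =====

/- Reference layer: duodigit strings as lists of Int digits.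
   rVal s = the integer a digit string denotes; rVals i j L = values of all length-L
   strings over {i, j}; rMs L = all of them over the 45 pairs (with multiplicity);
   rValidL n L = the nonzero multiples of n among them; rMin n L their minimum (0 if none);
   rL n = the first length L at which a nonzero multiple of n appears. -/
def rVal (s : List Int) : Int := s.foldl (fun a d => 10 * a + d) 0
def rVals (i j : Int) (L : Nat) : List Int := (pvProduct [i, j] L).map rVal
def rMs (L : Nat) : List Int := pvPairs.flatMap (fun p => rVals p.1 p.2 L)
def rValidL (n : Int) (L : Nat) : List Int :=
  (rMs L).filter (fun m => decide (m ≠ 0) && decide (n ∣ m))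
def rHas (n : Int) (L : Nat) : Prop := rValidL n L ≠ []
def rMin (n : Int) (L : Nat) : Int := match rValidL n L with | [] => 0 | x :: t => t.foldl min x

-- basic facts about rVal
theorem rVal_acc (t : List Int) : ∀ a : Int,
    t.foldl (fun a d => 10 * a + d) a = a * 10 ^ t.length + rVal t := by
  induction t with
  | nil => intro a; simp [rVal]
  | cons d t ih =>
    intro a
    have hv : rVal (d :: t) = d * 10 ^ t.length + rVal t := by
      simp only [rVal, List.foldl_cons]
      rw [ih (10 * 0 + d)]; norm_num; rfl
    simp only [List.foldl_cons, List.length_cons]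
    rw [ih (10 * a + d), hv, pow_succ]
    generalize rVal t = R
    generalize (10:Int) ^ t.length = P
    ring

theorem rVal_append_singleton (s : List Int) (d : Int) : rVal (s ++ [d]) = 10 * rVal s + d := by
  show (s ++ [d]).foldl (fun a d => 10 * a + d) 0 = _
  rw [List.foldl_append, rVal_acc [d]]
  show _ = 10 * rVal s + d
  simp only [rVal, List.length_cons, List.length_nil, List.foldl_cons, List.foldl_nil]
  generalize List.foldl (fun a d => 10 * a + d) 0 s = R
  ring

theorem rVal_nonneg (s : List Int) (h : ∀ d ∈ s, 0 ≤ d) : 0 ≤ rVal s := by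
  induction s using List.reverseRecOn with
  | nil => simp [rVal]
  | append_singleton t d ih =>
    rw [rVal_append_singleton]
    have h1 : 0 ≤ rVal t := ih (fun x hx => h x (by simp [hx]))
    have h2 : 0 ≤ d := h d (by simp)
    omega

theorem rVal_eq_zero (s : List Int) (h : ∀ d ∈ s, 0 ≤ d) (h0 : rVal s = 0) : ∀ d ∈ s, d = 0 := by
  induction s using List.reverseRecOn with
  | nil => simp
  | append_singleton t d ih =>
    rw [rVal_append_singleton] at h0
    have h1 : 0 ≤ rVal t := rVal_nonneg t (fun x hx => h x (by simp [hx]))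
    have h2 : 0 ≤ d := h d (by simp)
    have h3 : rVal t = 0 ∧ d = 0 := by omega
    intro x hx
    rcases List.mem_append.1 hx with hx | hx
    · exact ih (fun x hx => h x (by simp [hx])) h3.1 x hx
    · simp at hx; omega

theorem rVal_replicate_zero (l : Nat) : rVal (List.replicate l 0) = 0 := by
  induction l with
  | zero => simp [rVal]
  | succ l ih =>
    have : List.replicate (l+1) (0:Int) = List.replicate l 0 ++ [0] := by
      rw [List.replicate_succ' ]
    rw [this, rVal_append_singleton, ih]; ring

theorem mem_pvProduct {α : Type} (l : List α) (n : Nat) (s : List α) :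
    s ∈ pvProduct l n ↔ s.length = n ∧ ∀ x ∈ s, x ∈ l := by
  induction n generalizing s with
  | zero =>
    simp only [pvProduct]
    constructor
    · rintro h; simp at h; subst h; simp
    · rintro ⟨h1, _⟩; simp [List.eq_nil_of_length_eq_zero h1]
  | succ n ih =>
    simp only [pvProduct, List.mem_flatMap, List.mem_map]
    constructor
    · rintro ⟨c, hc, t, ht, rfl⟩
      rcases (ih t).1 ht with ⟨h1, h2⟩
      refine ⟨by simp [h1], ?_⟩
      intro x hx
      rcases List.mem_cons.1 hx with rfl | hx
      · exact hc
      · exact h2 x hx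
    · rintro ⟨h1, h2⟩
      cases s with
      | nil => simp at h1
      | cons c t =>
        refine ⟨c, h2 c (by simp), t, (ih t).2 ⟨by simpa using h1, fun x hx => h2 x (by simp [hx])⟩, rfl⟩

theorem pvPairs_bounds : ∀ p ∈ pvPairs, 1 ≤ p.1 ∧ p.1 ≤ 9 ∧ 0 ≤ p.2 ∧ p.2 < p.1 := by decide

theorem mem_rVals (i j : Int) (L : Nat) (m : Int) :
    m ∈ rVals i j L ↔ ∃ s, s.length = L ∧ (∀ x ∈ s, x = i ∨ x = j) ∧ rVal s = m := by
  unfold rVals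
  simp only [List.mem_map]
  constructor
  · rintro ⟨s, hs, rfl⟩
    rcases (mem_pvProduct _ _ _).1 hs with ⟨h1, h2⟩
    exact ⟨s, h1, fun x hx => by simpa using h2 x hx, rfl⟩
  · rintro ⟨s, h1, h2, rfl⟩
    exact ⟨s, (mem_pvProduct _ _ _).2 ⟨h1, fun x hx => by simpa using h2 x hx⟩, rfl⟩

theorem rMs_nonneg (L : Nat) (m : Int) (h : m ∈ rMs L) : 0 ≤ m := by
  unfold rMs at h
  rcases List.mem_flatMap.1 h with ⟨p, hp, hm⟩
  rcases (mem_rVals _ _ _ _).1 hm with ⟨s, _, hdig, rfl⟩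
  apply rVal_nonneg
  intro d hd
  rcases pvPairs_bounds p hp with ⟨hi1, _, hj0, hj⟩
  rcases hdig d hd with rfl | rfl <;> omega

theorem mem_rValidL (n : Int) (L : Nat) (m : Int) :
    m ∈ rValidL n L ↔ m ∈ rMs L ∧ m ≠ 0 ∧ n ∣ m := by
  unfold rValidL
  rw [List.mem_filter]
  simp

-- existence: pigeonhole on repunits over the pair (1, 0)
def rRep : Nat → Int
  | 0 => 0
  | k+1 => 10 * rRep k + 1

theorem rRep_eq_rVal (k : Nat) : rRep k = rVal (List.replicate k 1) := by
  induction k with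
  | zero => simp [rRep, rVal]
  | succ k ih =>
    have : List.replicate (k+1) (1:Int) = List.replicate k 1 ++ [1] := List.replicate_succ' ..
    rw [this, rVal_append_singleton, ← ih, rRep]

theorem rRep_pos (k : Nat) : 1 ≤ rRep (k+1) := by
  induction k with
  | zero => simp [rRep]
  | succ k ih => simp only [rRep] at ih ⊢; omega

theorem rRep_add (p q : Nat) : rRep (p + q) = rRep p * 10 ^ q + rRep q := by
  induction q with
  | zero => simp [rRep]
  | succ q ih =>
    have : p + (q + 1) = (p + q) + 1 := rfl
    rw [this, rRep, ih, rRep, pow_succ]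
    ring

theorem rVal_append (s t : List Int) : rVal (s ++ t) = rVal s * 10 ^ t.length + rVal t := by
  show List.foldl _ 0 (s ++ t) = _
  rw [List.foldl_append]
  exact rVal_acc t (rVal s)

theorem rExists (n : Int) (h : 1 ≤ n) : ∃ L, L ≤ n.toNat + 1 ∧ rHas n L := by
  have hmaps : ∀ k ∈ Finset.range (n.toNat + 2), rRep k % n ∈ Finset.Ico (0:Int) n := by
    intro k _
    simp only [Finset.mem_Ico]
    exact ⟨Int.emod_nonneg _ (by omega), Int.emod_lt_of_pos _ (by omega)⟩
  have hcard : (Finset.Ico (0:Int) n).card < (Finset.range (n.toNat + 2)).card := by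
    rw [Int.card_Ico, Finset.card_range]; omega
  obtain ⟨a, ha, b, hb, hab, heq⟩ :=
    Finset.exists_ne_map_eq_of_card_lt_of_maps_to hcard hmaps
  simp only [Finset.mem_range] at ha hb
  suffices key : ∀ a b : Nat, b < a → a < n.toNat + 2 → rRep a % n = rRep b % n →
      ∃ L, L ≤ n.toNat + 1 ∧ rHas n L by
    rcases lt_or_gt_of_ne hab with h' | h'
    · exact key b a h' hb heq.symm
    · exact key a b h' ha heq
  intro a b hba hlt heq2
  have hdvd : n ∣ rRep a - rRep b := Int.ModEq.dvd (show rRep b ≡ rRep a [ZMOD n] from heq2.symm)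
  have hsplit : rRep a = rRep (a - b) * 10 ^ b + rRep b := by
    have hab2 : a - b + b = a := by omega
    conv_lhs => rw [← hab2]
    rw [rRep_add]
  have h1 : 1 ≤ rRep (a - b) := by
    have hab3 : a - b = (a - b - 1) + 1 := by omega
    rw [hab3]; exact rRep_pos _
  have h2 : (0:Int) < 10 ^ b := pow_pos (by norm_num) b
  have hpos : 0 < rRep a - rRep b := by
    have : rRep a - rRep b = rRep (a - b) * 10 ^ b := by omega
    rw [this]
    exact mul_pos (by omega) h2
  have hvalrep : rVal (List.replicate (a - b) 1 ++ List.replicate b 0) = rRep a - rRep b := by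
    rw [rVal_append, rVal_replicate_zero, ← rRep_eq_rVal, List.length_replicate]
    omega
  have hs : rRep a - rRep b ∈ rMs a := by
    unfold rMs
    apply List.mem_flatMap.2
    refine ⟨(1, 0), by decide, ?_⟩
    apply (mem_rVals _ _ _ _).2
    refine ⟨List.replicate (a - b) 1 ++ List.replicate b 0, by simp; omega, ?_, hvalrep⟩
    intro x hx
    rcases List.mem_append.1 hx with hx | hx <;> simp at hx <;> simp [hx]
  refine ⟨a, by omega, ?_⟩
  intro hnil
  have hmem : rRep a - rRep b ∈ rValidL n a := (mem_rValidL _ _ _).2 ⟨hs, by omega, hdvd⟩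
  rw [hnil] at hmem
  simp at hmem

theorem rExists' (n : Int) (h : 1 ≤ n) : ∃ L, rHas n L :=
  (rExists n h).elim fun L hL => ⟨L, hL.2⟩

def rHasDec (n : Int) (L : Nat) : Decidable (rHas n L) :=
  decidable_of_iff (rValidL n L ≠ []) Iff.rfl

def rL (n : Int) : Nat :=
  if h : 1 ≤ n then @Nat.find (fun L => rHas n L) (rHasDec n) (rExists' n h) else 0

theorem rL_has (n : Int) (h : 1 ≤ n) : rHas n (rL n) := by
  unfold rL
  rw [dif_pos h]
  exact @Nat.find_spec (fun L => rHas n L) (rHasDec n) (rExists' n h)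

theorem rL_min (n : Int) (h : 1 ≤ n) (l : Nat) (hl : l < rL n) : ¬ rHas n l := by
  unfold rL at hl
  rw [dif_pos h] at hl
  exact @Nat.find_min (fun L => rHas n L) (rHasDec n) (rExists' n h) _ hl

theorem rL_le (n : Int) (h : 1 ≤ n) : rL n ≤ n.toNat + 1 := by
  unfold rL
  rw [dif_pos h]
  obtain ⟨L, hL1, hL2⟩ := rExists n h
  exact le_trans (@Nat.find_le _ (fun L => rHas n L) (rHasDec n) (rExists' n h) hL2) hL1

theorem rHas_zero_false (n : Int) : ¬ rHas n 0 := by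
  unfold rHas rValidL rMs
  intro hne
  apply hne
  rw [List.filter_eq_nil_iff]
  intro m hm
  rcases List.mem_flatMap.1 hm with ⟨p, _, hmem⟩
  unfold rVals at hmem
  simp only [pvProduct, List.map_cons, List.map_nil, List.mem_cons] at hmem
  rcases hmem with rfl | h
  · simp [rVal]
  · simp at h

theorem rL_pos (n : Int) (h : 1 ≤ n) : 1 ≤ rL n := by
  by_contra hc
  have h0 : rL n = 0 := by omega
  have := rL_has n h
  rw [h0] at this
  exact rHas_zero_false n this

theorem rMin_spec (n : Int) (L : Nat) (h : rHas n L) :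
    rMin n L ∈ rValidL n L ∧ ∀ w ∈ rValidL n L, rMin n L ≤ w := by
  unfold rHas at h
  cases hf : rValidL n L with
  | nil => exact absurd hf h
  | cons x t =>
    have hm : rMin n L = t.foldl min x := by unfold rMin; rw [hf]
    constructor
    · rw [hm]
      rcases PySem.List.foldl_min_mem t x with h1 | h1
      · rw [h1]; exact List.mem_cons_self
      · exact List.mem_cons_of_mem _ h1
    · intro w hw
      rw [hm]
      rcases List.mem_cons.1 hw with rfl | hw2
      · exact (PySem.List.foldl_min_le t w).1
      · exact (PySem.List.foldl_min_le t x).2 w hw2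

theorem rMin_eq_zero (n : Int) (L : Nat) (h : ¬ rHas n L) : rMin n L = 0 := by
  unfold rHas at h
  rw [not_not] at h
  unfold rMin
  rw [h]

theorem rMin_ne_zero (n : Int) (L : Nat) (h : rHas n L) : rMin n L ≠ 0 := by
  have h1 := (rMin_spec n L h).1
  rw [mem_rValidL] at h1
  exact h1.2.1

-- generic fold shapes
theorem foldl_flatMap {α β γ : Type} (l : List α) (g : α → List β) (f : γ → β → γ) (init : γ) :
    (l.flatMap g).foldl f init = l.foldl (fun acc x => (g x).foldl f acc) init := by
  induction l generalizing init with
  | nil => rfl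
  | cons x l ih => simp only [List.flatMap_cons, List.foldl_append, List.foldl_cons, ih]

-- ===== A side =====

def updC (C : List Int) (d : PySem.Dict Int Int) (m : Int) : PySem.Dict Int Int :=
  C.foldl (fun d c =>
    if (d.getD c 0 = 0 ∨ m < d.getD c 0) ∧ PySem.Int.mod m c = 0 then d.insert c m else d) d

def gstep (c : Int) (cur m : Int) : Int :=
  if m = 0 then cur else if (cur = 0 ∨ m < cur) ∧ PySem.Int.mod m c = 0 then m else cur

theorem getD_updC (C : List Int) (hC : C.Nodup) (d : PySem.Dict Int Int) (m c : Int)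
    (hm : m ≠ 0) :
    (updC C d m).getD c 0 = if c ∈ C then gstep c (d.getD c 0) m else d.getD c 0 := by
  unfold updC gstep
  rw [if_neg hm]
  induction C generalizing d with
  | nil => simp
  | cons c0 C ih =>
    have hC' : C.Nodup := (List.nodup_cons.1 hC).2
    have hc0 : c0 ∉ C := (List.nodup_cons.1 hC).1
    simp only [List.foldl_cons]
    rw [ih hC']
    by_cases hcc : c = c0
    · subst hcc
      rw [if_neg hc0, if_pos (List.mem_cons_self)]
      split_ifs with h1
      · rw [PySem.Dict.getD_insert, if_pos rfl]
      · rfl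
    · simp only [List.mem_cons, hcc, false_or]
      split_ifs with h1 h2 h2 <;>
        simp_all [PySem.Dict.getD_insert]

theorem toChars_pair (i j : Int) (hi1 : 1 ≤ i) (hi9 : i ≤ 9) (hj0 : 0 ≤ j) (hj : j < i) :
    PySem.Int.toChars (10*i+j) = [Char.ofNat (48 + i.toNat), Char.ofNat (48 + j.toNat)] := by
  interval_cases i <;> interval_cases j <;> decide

theorem pvProduct_map {α β : Type} (f : α → β) (l : List α) (n : Nat) :
    pvProduct (l.map f) n = (pvProduct l n).map (List.map f) := by
  induction n with
  | zero => rfl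
  | succ n ih =>
    simp only [pvProduct, ih, List.map_flatMap, List.flatMap_map, List.map_map]
    congr 1

theorem pvDigitsInt_map (s : List Int) (h : ∀ d ∈ s, 0 ≤ d ∧ d ≤ 9) :
    pvDigitsInt (s.map (fun d => Char.ofNat (48 + d.toNat))) = rVal s := by
  unfold pvDigitsInt rVal
  rw [List.foldl_map]
  apply PySem.List.foldl_congr_mem'
  intro d hd acc
  have hb := h d hd
  have hval : (48 + d.toNat).isValidChar := by
    constructor
    omega
  rw [Char.toNat_ofNat, if_pos hval]
  have : ((48 + d.toNat : Nat) : Int) = 48 + d := by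
    push_cast
    omega
  rw [this]
  ring

theorem pvAInner_eq (C : PySem.Set Int) (d : PySem.Dict Int Int) (L : Int) :
    pvAInner C d L = (rMs L.toNat).foldl (fun d m => if m = 0 then d else updC C d m) d := by
  unfold pvAInner rMs
  rw [foldl_flatMap]
  unfold pvPairs
  rw [foldl_flatMap]
  apply PySem.List.foldl_congr_mem'
  intro i hi acc
  rw [List.foldl_map]
  apply PySem.List.foldl_congr_mem'
  intro j hj acc2
  have hi' := PySem.List.mem_pyRange_one.1 hi
  have hj' := PySem.List.mem_pyRange_one.1 hj
  rw [toChars_pair i j (by omega) (by omega) (by omega) (by omega)]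
  have hmap : [Char.ofNat (48 + i.toNat), Char.ofNat (48 + j.toNat)] =
      [i, j].map (fun d => Char.ofNat (48 + d.toNat)) := rfl
  rw [hmap, pvProduct_map]
  rw [List.foldl_map]
  show _ = ((pvProduct [i, j] L.toNat).map rVal).foldl _ acc2
  rw [List.foldl_map]
  apply PySem.List.foldl_congr_mem'
  intro s hs acc3
  have hdig : ∀ d ∈ s, 0 ≤ d ∧ d ≤ 9 := by
    intro d hd
    have := ((mem_pvProduct _ _ _).1 hs).2 d hd
    simp at this
    rcases this with rfl | rfl <;> omega
  show (if pvDigitsInt (s.map (fun d => Char.ofNat (48 + d.toNat))) = 0 then acc3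
      else _) = _
  rw [pvDigitsInt_map s hdig]
  unfold updC
  rfl

theorem getD_body (C : List Int) (hC : C.Nodup) (d : PySem.Dict Int Int) (ms : List Int) (c : Int) :
    ((ms.foldl (fun d m => if m = 0 then d else updC C d m) d).getD c 0) =
      if c ∈ C then ms.foldl (gstep c) (d.getD c 0) else d.getD c 0 := by
  induction ms generalizing d with
  | nil => simp
  | cons m ms ih =>
    simp only [List.foldl_cons]
    by_cases hm : m = 0
    · subst hm
      rw [if_pos rfl, ih]
      have : gstep c (d.getD c 0) 0 = d.getD c 0 := by unfold gstep; simp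
      rw [this]
    · rw [if_neg hm, ih, getD_updC C hC d m c hm]
      by_cases hc : c ∈ C <;> simp [hc]

def mOf (c : Int) (ms : List Int) : Int :=
  match ms.filter (fun m => decide (m ≠ 0) && decide (c ∣ m)) with
  | [] => 0
  | x :: t => t.foldl min x

theorem foldl_gstep (c : Int) (ms : List Int) (h : ∀ m ∈ ms, 0 ≤ m) :
    ms.foldl (gstep c) 0 = mOf c ms := by
  have hpt : ∀ (cur m : Int), gstep c cur m =
      if (decide (m ≠ 0) && decide (c ∣ m)) then (if cur = 0 then m else min cur m) else cur := by
    intro cur m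
    unfold gstep
    by_cases hm0 : m = 0
    · simp [hm0]
    · rw [if_neg hm0]
      by_cases hd : c ∣ m
      · have hmod : PySem.Int.mod m c = 0 := (PySem.Int.mod_eq_zero_iff_dvd m c).2 hd
        simp only [hmod, and_true, hd, hm0, ne_eq, not_false_eq_true, decide_true,
          Bool.and_self, if_true]
        rw [min_def]
        split_ifs <;> omega
      · have hmod : ¬ PySem.Int.mod m c = 0 :=
          fun hc => hd ((PySem.Int.mod_eq_zero_iff_dvd m c).1 hc)
        simp [hmod, hd]
  have hrw : ms.foldl (gstep c) 0 =
      (ms.filter (fun m => decide (m ≠ 0) && decide (c ∣ m))).foldl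
        (fun cur m => if cur = 0 then m else min cur m) 0 := by
    rw [PySem.List.foldl_congr_mem' ms _
      (fun cur m => if (decide (m ≠ 0) && decide (c ∣ m)) then (if cur = 0 then m else min cur m) else cur)
      0 (by intro x _ acc; exact hpt acc x)]
    exact PySem.List.foldl_if_eq_foldl_filter _ _ _ _
  rw [hrw]
  unfold mOf
  have hpos : ∀ x ∈ ms.filter (fun m => decide (m ≠ 0) && decide (c ∣ m)), 0 < x := by
    intro x hx
    rw [List.mem_filter] at hx
    have := h x hx.1
    simp at hx
    omega
  cases hf : ms.filter (fun m => decide (m ≠ 0) && decide (c ∣ m)) with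
  | nil => rfl
  | cons x t =>
    rw [hf] at hpos
    have hx0 : 0 < x := hpos x List.mem_cons_self
    simp only [List.foldl_cons]
    have : ∀ (t : List Int) (a : Int), 0 < a → (∀ y ∈ t, 0 < y) →
        t.foldl (fun cur m => if cur = 0 then m else min cur m) a = t.foldl min a := by
      intro t
      induction t with
      | nil => intro a _ _; rfl
      | cons y t iht =>
        intro a ha hy
        simp only [List.foldl_cons]
        rw [if_neg (by omega)]
        exact iht (min a y) (lt_min ha (hy y List.mem_cons_self))
          (fun z hz => hy z (List.mem_cons_of_mem _ hz))
    exact this t x hx0 (fun z hz => hpos z (List.mem_cons_of_mem _ hz))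

theorem mOf_rMs (c : Int) (L : Nat) : mOf c (rMs L) = rMin c L := by
  rfl

-- the A-loop invariant
def rangeL (N : Int) : List Int := PySem.List.pyRange 1 (N+1) 1

def invD (N : Int) (k : Nat) (d : PySem.Dict Int Int) : Prop :=
  ∀ c ∈ rangeL N, d.getD c 0 = if rL c ≤ k then rMin c (rL c) else 0

theorem loop_main (N : Int) : ∀ (fuel k : Nat) (C : List Int) (d : PySem.Dict Int Int),
    C = (rangeL N).filter (fun c => decide (k < rL c)) →
    invD N k d →
    (∀ c ∈ rangeL N, rL c ≤ k + fuel) →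
    ∀ c ∈ rangeL N, (pvALoop fuel C d ((k : Int) + 1)).getD c 0 = rMin c (rL c) := by
  unfold invD
  intro fuel
  induction fuel with
  | zero =>
    intro k C d hC hD hfuel c hc
    simp only [pvALoop]
    have h1 : 1 ≤ c := (PySem.List.mem_pyRange_one.1 hc).1
    have := hfuel c hc
    rw [hD c hc, if_pos (by omega)]
  | succ fuel ih =>
    intro k C d hC hD hfuel c hc
    simp only [pvALoop]
    by_cases hCe : C = []
    · rw [hCe]
      have hl : ¬ (PySem.Set.len ([] : List Int) > 0) := by simp [PySem.Set.len]
      rw [if_neg hl]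
      have hfil : (rangeL N).filter (fun c => decide (k < rL c)) = [] := by rw [← hC, hCe]
      have hall := List.filter_eq_nil_iff.1 hfil
      have hck : ¬ (k < rL c) := by simpa using hall c hc
      rw [hD c hc, if_pos (by omega)]
    · have hlen : PySem.Set.len C > 0 := by
        have h0 : 0 < C.length := List.length_pos_iff.2 hCe
        simp only [PySem.Set.len]
        exact_mod_cast h0
      rw [if_pos hlen]
      have hNodup : C.Nodup := by
        rw [hC]; exact List.Nodup.filter _ (PySem.List.nodup_pyRange_one 1 (N+1))
      have htn : ((k : Int)+1).toNat = k+1 := by omega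
      have hinner : pvAInner C d ((k:Int)+1) =
          (rMs (k+1)).foldl (fun d m => if m = 0 then d else updC C d m) d := by
        rw [pvAInner_eq, htn]
      have hd' : ∀ x, (pvAInner C d ((k:Int)+1)).getD x 0 =
          if x ∈ C then (rMs (k+1)).foldl (gstep x) (d.getD x 0) else d.getD x 0 := by
        intro x; rw [hinner, getD_body C hNodup]
      have hD' : ∀ x ∈ rangeL N, (pvAInner C d ((k:Int)+1)).getD x 0 =
          if rL x ≤ k+1 then rMin x (rL x) else 0 := by
        intro x hx
        have h1x : 1 ≤ x := (PySem.List.mem_pyRange_one.1 hx).1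
        rw [hd' x]
        by_cases hxC : x ∈ C
        · have hklt : k < rL x := by
            rw [hC] at hxC
            rcases List.mem_filter.1 hxC with ⟨_, hp⟩
            simpa using hp
          rw [if_pos hxC, hD x hx, if_neg (by omega)]
          rw [foldl_gstep x _ (fun m hm => rMs_nonneg _ m hm), mOf_rMs]
          by_cases heq : rL x = k+1
          · rw [if_pos (by omega), ← heq]
          · have hgt : k+1 < rL x := by omega
            rw [if_neg (by omega)]
            exact rMin_eq_zero x (k+1) (rL_min x h1x (k+1) hgt)
        · have hxk : rL x ≤ k := by
            by_contra hcon
            exact hxC (by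
              rw [hC]
              exact List.mem_filter.2 ⟨hx, by simpa using (by omega : k < rL x)⟩)
          rw [if_neg hxC, hD x hx, if_pos hxk, if_pos (by omega)]
      have hC' : PySem.Set.ofList
            (C.filter (fun c => (pvAInner C d ((k:Int)+1)).getD c 0 == 0)) =
          (rangeL N).filter (fun c => decide (k+1 < rL c)) := by
        rw [PySem.Set.ofList_eq_self_of_nodup _ (List.Nodup.filter _ hNodup)]
        have hstep1 : C.filter (fun c => (pvAInner C d ((k:Int)+1)).getD c 0 == 0) =
            C.filter (fun c => decide (k+1 < rL c)) := by
          apply List.filter_congr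
          intro x hxC
          have hx : x ∈ rangeL N := by
            rw [hC] at hxC; exact (List.mem_filter.1 hxC).1
          have hklt : k < rL x := by
            rw [hC] at hxC
            simpa using (List.mem_filter.1 hxC).2
          have h1x : 1 ≤ x := (PySem.List.mem_pyRange_one.1 hx).1
          have hval := hD' x hx
          by_cases heq : rL x ≤ k + 1
          · have hne := rMin_ne_zero x (rL x) (rL_has x h1x)
            rw [if_pos heq] at hval
            simp [hval, hne, show ¬ (k+1 < rL x) by omega]
          · rw [if_neg heq] at hval
            simp [hval, show k+1 < rL x by omega]
        rw [hstep1, hC, List.filter_filter]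
        apply List.filter_congr
        intro x hx
        by_cases h : k+1 < rL x
        · simp [h, show k < rL x by omega]
        · simp [h]
      have hstep : ∀ x ∈ rangeL N, rL x ≤ (k+1) + fuel := by
        intro x hx; have := hfuel x hx; omega
      have hcast : ((k:Int)+1)+1 = (((k+1 : Nat) : Int))+1 := by push_cast; ring
      rw [hC', hcast]
      exact ih (k+1) _ _ rfl hD' hstep c hc

theorem getD_init (N : Int) (c : Int) :
    (((rangeL N).foldl (fun d n => d.insert n 0)
      (PySem.Dict.empty : PySem.Dict Int Int)).getD c 0) = 0 := by
  suffices h : ∀ (l : List Int) (d : PySem.Dict Int Int), (∀ x, d.getD x 0 = 0) →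
      ∀ x, (l.foldl (fun d n => d.insert n 0) d).getD x 0 = 0 by
    exact h _ _ (fun x => PySem.Dict.getD_empty x 0) c
  intro l
  induction l with
  | nil => intro d hd x; exact hd x
  | cons a l ih =>
    intro d hd x
    simp only [List.foldl_cons]
    apply ih
    intro y
    rw [PySem.Dict.getD_insert]
    split_ifs with h
    · rfl
    · exact hd y

theorem euler_714_eq (N : Int) :
    euler_714 N = (rangeL N).foldl (fun acc n => acc + rMin n (rL n)) 0 := by
  unfold euler_714
  have hnodup := PySem.List.nodup_pyRange_one (1:Int) (N+1)
  rw [PySem.Set.ofList_eq_self_of_nodup _ hnodup]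
  have h0 : (PySem.List.pyRange 1 (N+1) 1) = (rangeL N).filter (fun c => decide (0 < rL c)) := by
    unfold rangeL
    refine (List.filter_eq_self.2 ?_).symm
    intro a ha
    have h1 : 1 ≤ a := (PySem.List.mem_pyRange_one.1 ha).1
    simpa using rL_pos a h1
  have hD0 : ∀ c ∈ rangeL N,
      ((PySem.List.pyRange 1 (N+1) 1).foldl (fun d n => d.insert n 0)
        (PySem.Dict.empty : PySem.Dict Int Int)).getD c 0 =
        if rL c ≤ 0 then rMin c (rL c) else 0 := by
    intro c hc
    have h1 : 1 ≤ c := (PySem.List.mem_pyRange_one.1 hc).1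
    have := rL_pos c h1
    have hg := getD_init N c
    unfold rangeL at hg
    rw [hg, if_neg (by omega)]
  have hfuel : ∀ c ∈ rangeL N, rL c ≤ 0 + (N.toNat + 2) := by
    intro c hc
    have hm := PySem.List.mem_pyRange_one.1 hc
    have h1 : 1 ≤ c := hm.1
    have h2 : c ≤ N := by omega
    have h3 := rL_le c h1
    have h4 : c.toNat ≤ N.toNat := by omega
    omega
  have hmain := loop_main N (N.toNat + 2) 0 _ _ h0 hD0 hfuel
  have hone : (((0:Nat) : Int)) + 1 = 1 := by norm_num
  rw [hone] at hmain
  apply PySem.List.foldl_congr_mem'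
  intro x hx acc
  rw [hmain x hx]

-- ===== B side =====

def pvPv (i j : Int) (l : Nat) (w : Int) : Prop := w ≠ 0 ∧ w ∈ rVals i j l

def relD (n i j : Int) (l : Nat) (dp : PySem.Dict Int Int) : Prop :=
  dp.keys.Nodup ∧
  (∀ r v, dp.get? r = some v →
    pvPv i j l v ∧ PySem.Int.mod v n = r ∧
      ∀ w, pvPv i j l w → PySem.Int.mod w n = r → v ≤ w) ∧
  (∀ w, pvPv i j l w → dp.contains (PySem.Int.mod w n) = true)

theorem mod_pos_eq (a n : Int) (h : 0 < n) : PySem.Int.mod a n = a % n := by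
  show a.fmod n = a % n
  rw [Int.fmod_eq_emod]
  simp [Or.inl (by omega : (0:Int) ≤ n)]

theorem mod_congr_step (u v d n : Int) (hn : 0 < n)
    (h : PySem.Int.mod u n = PySem.Int.mod v n) :
    PySem.Int.mod (10*u+d) n = PySem.Int.mod (10*v+d) n := by
  rw [mod_pos_eq u n hn, mod_pos_eq v n hn] at h
  rw [mod_pos_eq _ _ hn, mod_pos_eq _ _ hn]
  have h2 : u ≡ v [ZMOD n] := h
  exact Int.ModEq.add_right d (Int.ModEq.mul_left 10 h2)

theorem pvPv_succ (i j : Int) (hp : (i, j) ∈ pvPairs) (l : Nat) (hl : 1 ≤ l) (w : Int) :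
    pvPv i j (l+1) w ↔
      (∃ v, pvPv i j l v ∧ ∃ d, (d = i ∨ d = j) ∧ w = 10 * v + d) ∨ (j = 0 ∧ w = i) := by
  rcases pvPairs_bounds _ hp with ⟨hi1, hi9, hj0, hji⟩
  unfold pvPv
  constructor
  · rintro ⟨hw0, hwm⟩
    rcases (mem_rVals _ _ _ _).1 hwm with ⟨s, hlen, hdig, rfl⟩
    rcases List.eq_nil_or_concat' s with rfl | ⟨s', d, rfl⟩
    · simp at hlen
    have hlen' : s'.length = l := by simpa using hlen
    have hd : d = i ∨ d = j := hdig d (by simp)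
    have hdig' : ∀ x ∈ s', x = i ∨ x = j := fun x hx => hdig x (by simp [hx])
    have hdig0 : ∀ x ∈ s', 0 ≤ x := by
      intro x hx; rcases hdig' x hx with rfl | rfl <;> omega
    rw [rVal_append_singleton] at hw0 ⊢
    by_cases hv0 : rVal s' = 0
    · right
      have hall := rVal_eq_zero s' hdig0 hv0
      have hs'ne : s' ≠ [] := by intro h; subst h; simp at hlen'; omega
      obtain ⟨x0, hx0⟩ := List.exists_mem_of_ne_nil s' hs'ne
      have hj0' : j = 0 := by
        rcases hdig' x0 hx0 with h | h
        · have := hall x0 hx0; omega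
        · have := hall x0 hx0; omega
      have hdi : d = i := by
        rcases hd with rfl | rfl
        · rfl
        · rw [hv0] at hw0; omega
      rw [hv0, hdi] at hw0 ⊢
      exact ⟨hj0', by omega⟩
    · left
      refine ⟨rVal s', ⟨hv0, (mem_rVals _ _ _ _).2 ⟨s', hlen', hdig', rfl⟩⟩, d, hd, rfl⟩
  · rintro (⟨v, ⟨hv0, hvm⟩, d, hd, rfl⟩ | ⟨hj0', hwi⟩)
    · rcases (mem_rVals _ _ _ _).1 hvm with ⟨s, hlen, hdig, rfl⟩
      have hvpos : 0 < rVal s := by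
        have : 0 ≤ rVal s := rVal_nonneg s (by
          intro x hx; rcases hdig x hx with rfl | rfl <;> omega)
        omega
      have hdpos : 0 ≤ d := by rcases hd with rfl | rfl <;> omega
      constructor
      · omega
      · apply (mem_rVals _ _ _ _).2
        refine ⟨s ++ [d], by simp [hlen], ?_, rVal_append_singleton s d⟩
        intro x hx
        rcases List.mem_append.1 hx with hx | hx
        · exact hdig x hx
        · simp at hx; subst hx; exact hd
    · rw [hwi]
      constructor
      · omega
      · apply (mem_rVals _ _ _ _).2
        refine ⟨List.replicate l 0 ++ [i], by simp, ?_, ?_⟩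
        · intro x hx
          rcases List.mem_append.1 hx with hx | hx
          · right; rw [List.eq_of_mem_replicate hx, hj0']
          · simp at hx; subst hx; left; rfl
        · rw [rVal_append_singleton, rVal_replicate_zero]
          omega

theorem relD_init (n i j : Int) (hp : (i, j) ∈ pvPairs) : relD n i j 1 (pvBInit n i j) := by
  rcases pvPairs_bounds _ hp with ⟨hi1, hi9, hj0, hji⟩
  have hv : rVals i j 1 = [i, j] := by simp [rVals, pvProduct, rVal]
  have hpv : ∀ w, pvPv i j 1 w ↔ (w ≠ 0 ∧ (w = i ∨ w = j)) := by
    intro w; unfold pvPv; rw [hv]; simp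
  unfold pvBInit relD
  by_cases hj : j = 0
  · rw [if_neg (by simp [hj])]
    refine ⟨PySem.Dict.nodup_keys_insert _ _ _ PySem.Dict.nodup_keys_empty, ?_, ?_⟩
    · intro r v hrv
      rw [PySem.Dict.get?_insert] at hrv
      split_ifs at hrv with hr
      · injection hrv with hrv'
        subst hrv'
        refine ⟨(hpv i).2 ⟨by omega, Or.inl rfl⟩, hr.symm, ?_⟩
        intro w hw _
        rcases (hpv w).1 hw with ⟨hw0, rfl | rfl⟩
        · omega
        · omega
      · rw [PySem.Dict.get?_empty] at hrv; cases hrv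
    · intro w hw
      rcases (hpv w).1 hw with ⟨hw0, rfl | rfl⟩
      · exact PySem.Dict.contains_insert_self _ _ _
      · omega
  · rw [if_pos (by simp [hj])]
    refine ⟨PySem.Dict.nodup_keys_insert _ _ _
      (PySem.Dict.nodup_keys_insert _ _ _ PySem.Dict.nodup_keys_empty), ?_, ?_⟩
    · intro r v hrv
      rw [PySem.Dict.get?_insert] at hrv
      split_ifs at hrv with hr
      · injection hrv with hrv'
        subst hrv'
        refine ⟨(hpv j).2 ⟨hj, Or.inr rfl⟩, hr.symm, ?_⟩
        intro w hw hwr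
        rcases (hpv w).1 hw with ⟨hw0, rfl | rfl⟩
        · omega
        · omega
      · rw [PySem.Dict.get?_insert] at hrv
        split_ifs at hrv with hr2
        · injection hrv with hrv'
          subst hrv'
          refine ⟨(hpv i).2 ⟨by omega, Or.inl rfl⟩, hr2.symm, ?_⟩
          intro w hw hwr
          rcases (hpv w).1 hw with ⟨hw0, rfl | rfl⟩
          · omega
          · exact absurd hwr.symm hr
        · rw [PySem.Dict.get?_empty] at hrv; cases hrv
    · intro w hw
      rcases (hpv w).1 hw with ⟨hw0, rfl | rfl⟩
      · rw [PySem.Dict.contains_insert]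
        by_cases he : PySem.Int.mod w n = PySem.Int.mod j n
        · simp [he]
        · simp [PySem.Dict.contains_insert_self]
      · exact PySem.Dict.contains_insert_self _ _ _

def updMin (d : PySem.Dict Int Int) (q : Int × Int) : PySem.Dict Int Int :=
  if ¬ d.contains q.1 ∨ q.2 < d.getD q.1 0 then d.insert q.1 q.2 else d

theorem updMin_nodup (d : PySem.Dict Int Int) (q : Int × Int) (h : d.keys.Nodup) :
    (updMin d q).keys.Nodup := by
  unfold updMin
  split_ifs
  · exact PySem.Dict.nodup_keys_insert _ _ _ h
  · exact h

theorem contains_of_get?_eq_some (d : PySem.Dict Int Int) (r : Int) (v : Int)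
    (h : d.get? r = some v) : d.contains r = true := by
  cases hb : d.contains r
  · rw [(PySem.Dict.get?_eq_none_iff_contains d r).2 hb] at h; cases h
  · rfl

theorem get?_of_contains (d : PySem.Dict Int Int) (r : Int) (h : d.contains r = true) :
    ∃ v, d.get? r = some v := by
  cases hg : d.get? r with
  | none => rw [(PySem.Dict.get?_eq_none_iff_contains d r).1 hg] at h; cases h
  | some v => exact ⟨v, rfl⟩

theorem updMin_mono (d : PySem.Dict Int Int) (q : Int × Int) (r w : Int)
    (h : d.get? r = some w) : ∃ w', (updMin d q).get? r = some w' ∧ w' ≤ w := by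
  unfold updMin
  split_ifs with hcond
  · rw [PySem.Dict.get?_insert]
    by_cases hr : r = q.1
    · refine ⟨q.2, by rw [if_pos hr], ?_⟩
      rcases hcond with hnc | hlt
      · exact absurd (contains_of_get?_eq_some d r w h) (hr ▸ hnc)
      · have := PySem.Dict.getD_of_get?_eq_some d 0 h
        rw [hr] at this
        omega
    · exact ⟨w, by rw [if_neg hr]; exact h, le_refl w⟩
  · exact ⟨w, h, le_refl w⟩

theorem updMin_self (d : PySem.Dict Int Int) (q : Int × Int) :
    ∃ w', (updMin d q).get? q.1 = some w' ∧ w' ≤ q.2 := by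
  unfold updMin
  split_ifs with hcond
  · exact ⟨q.2, by rw [PySem.Dict.get?_insert, if_pos rfl], le_refl _⟩
  · push_neg at hcond
    obtain ⟨hc, hge⟩ := hcond
    obtain ⟨v, hv⟩ := get?_of_contains d q.1 hc
    refine ⟨v, hv, ?_⟩
    have := PySem.Dict.getD_of_get?_eq_some d 0 hv
    omega

theorem updMin_get (d : PySem.Dict Int Int) (q : Int × Int) (r v : Int)
    (h : (updMin d q).get? r = some v) : d.get? r = some v ∨ (r, v) = q := by
  unfold updMin at h
  split_ifs at h with hcond
  · rw [PySem.Dict.get?_insert] at h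
    split_ifs at h with hr
    · injection h with h'
      right
      rw [hr, ← h']
    · exact Or.inl h
  · exact Or.inl h

theorem updMin_fold (ps : List (Int × Int)) : ∀ d0 : PySem.Dict Int Int, d0.keys.Nodup →
    (ps.foldl updMin d0).keys.Nodup ∧
    (∀ r v, (ps.foldl updMin d0).get? r = some v →
      (d0.get? r = some v ∨ (r, v) ∈ ps) ∧
      (∀ w, (d0.get? r = some w ∨ (r, w) ∈ ps) → v ≤ w)) ∧
    (∀ r w, (d0.get? r = some w ∨ (r, w) ∈ ps) → (ps.foldl updMin d0).contains r = true) := by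
  induction ps with
  | nil =>
    intro d0 h0
    simp only [List.foldl_nil]
    refine ⟨h0, ?_, ?_⟩
    · intro r v hv
      refine ⟨Or.inl hv, ?_⟩
      intro w hw
      rcases hw with hw | hw
      · rw [hv] at hw; injection hw with h'; omega
      · simp at hw
    · intro r w hw
      rcases hw with hw | hw
      · exact contains_of_get?_eq_some _ _ _ hw
      · simp at hw
  | cons q ps ih =>
    intro d0 h0
    simp only [List.foldl_cons]
    obtain ⟨hN, hspec, hcont⟩ := ih (updMin d0 q) (updMin_nodup d0 q h0)
    refine ⟨hN, ?_, ?_⟩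
    · intro r v hv
      obtain ⟨hc1, hc2⟩ := hspec r v hv
      constructor
      · rcases hc1 with hc1 | hc1
        · rcases updMin_get d0 q r v hc1 with h | h
          · exact Or.inl h
          · exact Or.inr (h ▸ List.mem_cons_self)
        · exact Or.inr (List.mem_cons_of_mem _ hc1)
      · intro w hw
        rcases hw with hw | hw
        · obtain ⟨w', hw'1, hw'2⟩ := updMin_mono d0 q r w hw
          exact le_trans (hc2 w' (Or.inl hw'1)) hw'2
        · rcases List.mem_cons.1 hw with heq | hw
          · obtain ⟨w', hw'1, hw'2⟩ := updMin_self d0 q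
            have hr : q.1 = r := by rw [← heq]
            rw [hr] at hw'1
            have hq2 : q.2 = w := by rw [← heq]
            rw [hq2] at hw'2
            exact le_trans (hc2 w' (Or.inl hw'1)) hw'2
          · exact hc2 w (Or.inr hw)
    · intro r w hw
      rcases hw with hw | hw
      · obtain ⟨w', hw'1, _⟩ := updMin_mono d0 q r w hw
        exact hcont r w' (Or.inl hw'1)
      · rcases List.mem_cons.1 hw with heq | hw
        · obtain ⟨w', hw'1, _⟩ := updMin_self d0 q
          have hr : q.1 = r := by rw [← heq]
          rw [hr] at hw'1
          exact hcont r w' (Or.inl hw'1)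
        · exact hcont r w (Or.inr hw)

theorem relD_step (n i j : Int) (hn : 1 ≤ n) (hp : (i, j) ∈ pvPairs) (l : Nat) (hl : 1 ≤ l)
    (dp : PySem.Dict Int Int) (h : relD n i j l dp) : relD n i j (l+1) (pvBStep n i j dp) := by
  obtain ⟨hNd, hSpec, hCont⟩ := h
  rcases pvPairs_bounds _ hp with ⟨hi1, hi9, hj0, hji⟩
  have hn0 : (0:Int) < n := by omega
  set ps : List (Int × Int) := dp.items.flatMap (fun rv =>
    [(PySem.Int.mod (10*rv.2+i) n, 10*rv.2+i), (PySem.Int.mod (10*rv.2+j) n, 10*rv.2+j)])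
    with hps
  set psFull : List (Int × Int) := if j = 0 then ps ++ [(PySem.Int.mod i n, i)] else ps
    with hpsFull
  have hfold : dp.items.foldl (fun new rv =>
      [i, j].foldl (fun new d =>
        let w := 10 * rv.2 + d
        let rr := PySem.Int.mod w n
        if ¬ new.contains rr ∨ w < new.getD rr 0 then new.insert rr w else new) new)
      PySem.Dict.empty = ps.foldl updMin PySem.Dict.empty := by
    rw [hps, foldl_flatMap]
    apply PySem.List.foldl_congr_mem'
    intro rv _ acc
    rfl
  have hstep : pvBStep n i j dp = psFull.foldl updMin PySem.Dict.empty := by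
    by_cases hj : j = 0
    · rw [hpsFull, if_pos hj, List.foldl_append, List.foldl_cons, List.foldl_nil, ← hfold]
      subst hj
      unfold pvBStep updMin
      simp only [true_and]
    · rw [hpsFull, if_neg hj, ← hfold]
      unfold pvBStep
      simp only [hj, false_and, if_false]
  have hpsB : ∀ (r' v' : Int), (r', v') ∈ dp.items → ∀ d, (d = i ∨ d = j) →
      (PySem.Int.mod (10*v'+d) n, 10*v'+d) ∈ ps := by
    intro r' v' hmem d hd
    rw [hps]
    apply List.mem_flatMap.2
    refine ⟨(r', v'), hmem, ?_⟩
    rcases hd with rfl | rfl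
    · exact List.mem_cons_self
    · exact List.mem_cons_of_mem _ List.mem_cons_self
  have hpsA : ∀ r w, (r, w) ∈ ps → ∃ r' v', (r', v') ∈ dp.items ∧
      ∃ d, (d = i ∨ d = j) ∧ w = 10*v'+d ∧ r = PySem.Int.mod w n := by
    intro r w hw
    rw [hps] at hw
    rcases List.mem_flatMap.1 hw with ⟨rv, hrv, hin⟩
    rcases List.mem_cons.1 hin with hin | hin
    · rcases Prod.mk.injEq .. ▸ hin with ⟨h1, h2⟩
      exact ⟨rv.1, rv.2, hrv, i, Or.inl rfl, h2, by rw [h1, h2]⟩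
    · rcases List.mem_cons.1 hin with hin | hin
      · rcases Prod.mk.injEq .. ▸ hin with ⟨h1, h2⟩
        exact ⟨rv.1, rv.2, hrv, j, Or.inr rfl, h2, by rw [h1, h2]⟩
      · simp at hin
  -- every value of level l+1 is dominated by a generated candidate with the same key
  have hcover : ∀ w, pvPv i j (l+1) w →
      ∃ w', (PySem.Int.mod w n, w') ∈ psFull ∧ w' ≤ w := by
    intro w hw
    rcases (pvPv_succ i j hp l hl w).1 hw with ⟨u, hu, d, hd, rfl⟩ | ⟨hj0', hwi2⟩
    · obtain ⟨v', hv'⟩ := get?_of_contains dp (PySem.Int.mod u n) (hCont u hu)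
      obtain ⟨hv'p, hv'mod, hv'min⟩ := hSpec _ _ hv'
      have hv'u : v' ≤ u := hv'min u hu rfl
      have hmm : (v' ∈ dp.items.map Prod.snd) := by
        exact List.mem_map.2 ⟨(PySem.Int.mod u n, v'), PySem.Dict.mem_items_of_get?_eq_some dp hv', rfl⟩
      have hmemit : (PySem.Int.mod u n, v') ∈ dp.items :=
        PySem.Dict.mem_items_of_get?_eq_some dp hv'
      have hq : (PySem.Int.mod (10*v'+d) n, 10*v'+d) ∈ ps :=
        hpsB _ _ hmemit d hd
      have hmodeq : PySem.Int.mod (10*v'+d) n = PySem.Int.mod (10*u+d) n :=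
        mod_congr_step v' u d n hn0 (by rw [hv'mod])
      refine ⟨10*v'+d, ?_, by omega⟩
      rw [← hmodeq]
      rw [hpsFull]
      split_ifs
      · exact List.mem_append.2 (Or.inl hq)
      · exact hq
    · rw [hwi2]
      refine ⟨i, ?_, le_refl i⟩
      rw [hpsFull, if_pos hj0']
      exact List.mem_append.2 (Or.inr List.mem_cons_self)
  -- every generated candidate is a value of level l+1 with the matching key
  have hdecomp : ∀ r w, (r, w) ∈ psFull → pvPv i j (l+1) w ∧ PySem.Int.mod w n = r := by
    intro r w hw
    have hw' : (r, w) ∈ ps ∨ (j = 0 ∧ r = PySem.Int.mod i n ∧ w = i) := by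
      rw [hpsFull] at hw
      split_ifs at hw with hj
      · rcases List.mem_append.1 hw with hw | hw
        · exact Or.inl hw
        · rcases List.mem_cons.1 hw with hw | hw
          · rcases Prod.mk.injEq .. ▸ hw with ⟨h1, h2⟩
            exact Or.inr ⟨hj, h1, h2⟩
          · simp at hw
      · exact Or.inl hw
    rcases hw' with hw | ⟨hj0', hr, hwi⟩
    · obtain ⟨r', v', hmemit, d, hd, rfl, rfl⟩ := hpsA r w hw
      have hv' : dp.get? r' = some v' := (PySem.Dict.get?_eq_some_iff_mem_items dp r' v' hNd).2 hmemit
      obtain ⟨hv'p, _, _⟩ := hSpec _ _ hv'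
      exact ⟨(pvPv_succ i j hp l hl _).2 (Or.inl ⟨v', hv'p, d, hd, rfl⟩), rfl⟩
    · rw [hwi]
      exact ⟨(pvPv_succ i j hp l hl _).2 (Or.inr ⟨hj0', rfl⟩), hr.symm⟩
  rw [hstep]
  obtain ⟨ufN, ufGet, ufCont⟩ := updMin_fold psFull PySem.Dict.empty PySem.Dict.nodup_keys_empty
  refine ⟨ufN, ?_, ?_⟩
  · intro r v hv
    obtain ⟨hc1, hc2⟩ := ufGet r v hv
    have hmemv : (r, v) ∈ psFull := by
      rcases hc1 with hc1 | hc1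
      · rw [PySem.Dict.get?_empty] at hc1; cases hc1
      · exact hc1
    obtain ⟨hpv, hmod⟩ := hdecomp r v hmemv
    refine ⟨hpv, hmod, ?_⟩
    intro w hwp hwr
    obtain ⟨w', hw'mem, hw'le⟩ := hcover w hwp
    rw [hwr] at hw'mem
    exact le_trans (hc2 w' (Or.inr hw'mem)) hw'le
  · intro w hwp
    obtain ⟨w', hw'mem, _⟩ := hcover w hwp
    exact ufCont _ w' (Or.inr hw'mem)

theorem pvBLoop_eq (n : Int) (hn : 1 ≤ n) : ∀ (fuel l : Nat) (F : Int × Int → PySem.Dict Int Int),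
    1 ≤ l → l ≤ rL n → rL n < l + fuel →
    (∀ p ∈ pvPairs, relD n p.1 p.2 l (F p)) →
    pvBLoop n fuel (pvPairs.map F) = rMin n (rL n) := by
  intro fuel
  induction fuel with
  | zero => intro l F h1 h2 h3 hrel; omega
  | succ fuel ih =>
    intro l F h1 h2 h3 hrel
    simp only [pvBLoop]
    rw [PySem.List.foldl_append_if]
    rw [List.nil_append]
    -- facts about the hit list
    have hhit_dec : ∀ y, y ∈ ((pvPairs.map F).filter (fun dp => dp.contains 0)).map
        (fun dp => dp.getD 0 0) → y ∈ rValidL n l := by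
      intro y hy
      rcases List.mem_map.1 hy with ⟨dp, hdp, rfl⟩
      rcases List.mem_filter.1 hdp with ⟨hdp2, hcont0⟩
      rcases List.mem_map.1 hdp2 with ⟨p, hpmem, rfl⟩
      obtain ⟨hNd, hSpec, hCont⟩ := hrel p hpmem
      obtain ⟨v, hv⟩ := get?_of_contains _ 0 hcont0
      rw [PySem.Dict.getD_of_get?_eq_some _ 0 hv]
      obtain ⟨hpv, hmod, _⟩ := hSpec _ _ hv
      refine (mem_rValidL _ _ _).2 ⟨List.mem_flatMap.2 ⟨p, hpmem, hpv.2⟩, hpv.1, ?_⟩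
      exact (PySem.Int.mod_eq_zero_iff_dvd v n).1 hmod
    by_cases hl_eq : l = rL n
    · -- hitting level: the pair that holds rMin reaches residue 0; the min of the hits is rMin
      have hhas : rHas n l := by rw [hl_eq]; exact rL_has n hn
      have hrmem := (rMin_spec n l hhas).1
      have hrle := (rMin_spec n l hhas).2
      rw [mem_rValidL] at hrmem
      obtain ⟨hms, hm0, hdvd⟩ := hrmem
      rcases List.mem_flatMap.1 hms with ⟨p0, hp0, hmem0⟩
      obtain ⟨hNd0, hSpec0, hCont0⟩ := hrel p0 hp0
      have hpv0 : pvPv p0.1 p0.2 l (rMin n l) := ⟨hm0, hmem0⟩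
      have hmodr : PySem.Int.mod (rMin n l) n = 0 := (PySem.Int.mod_eq_zero_iff_dvd _ n).2 hdvd
      have hcont0 : (F p0).contains 0 = true := by
        have hcc := hCont0 _ hpv0
        rwa [hmodr] at hcc
      obtain ⟨v, hv⟩ := get?_of_contains _ 0 hcont0
      obtain ⟨hpvv, hmodv, hminv⟩ := hSpec0 _ _ hv
      have hvle : v ≤ rMin n l := hminv _ hpv0 hmodr
      have hyp_mem : (F p0).getD 0 0 ∈ ((pvPairs.map F).filter
          (fun dp => dp.contains 0)).map (fun dp => dp.getD 0 0) := by
        apply List.mem_map.2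
        exact ⟨F p0, List.mem_filter.2 ⟨List.mem_map.2 ⟨p0, hp0, rfl⟩, hcont0⟩, rfl⟩
      rcases hh : ((pvPairs.map F).filter (fun dp => dp.contains 0)).map
          (fun dp => dp.getD 0 0) with _ | ⟨x, t⟩
      · rw [hh] at hyp_mem; cases hyp_mem
      · rw [hh]
        rw [if_pos (by simp : (x :: t).length > 0)]
        rw [PySem.List.min?_id_cons]
        simp only [Option.getD_some]
        have hstar_mem : t.foldl min x ∈ x :: t := by
          rcases PySem.List.foldl_min_mem t x with h | h
          · rw [h]; exact List.mem_cons_self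
          · exact List.mem_cons_of_mem _ h
        have hstar_le : ∀ y ∈ x :: t, t.foldl min x ≤ y := by
          intro y hy
          rcases List.mem_cons.1 hy with rfl | hy
          · exact (PySem.List.foldl_min_le t y).1
          · exact (PySem.List.foldl_min_le t x).2 y hy
        have hstar_valid : t.foldl min x ∈ rValidL n l := by
          apply hhit_dec
          rw [hh]
          exact hstar_mem
        have hge : rMin n l ≤ t.foldl min x := hrle _ hstar_valid
        have hyp_mem' : (F p0).getD 0 0 ∈ x :: t := by rw [← hh]; exact hyp_mem
        have hle2 : t.foldl min x ≤ (F p0).getD 0 0 := hstar_le _ hyp_mem'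
        rw [PySem.Dict.getD_of_get?_eq_some _ 0 hv] at hle2
        rw [← hl_eq]
        omega
    · -- below the hitting level: no pair reaches residue 0 yet
      have hlt : l < rL n := by omega
      have hno : ¬ rHas n l := rL_min n hn l hlt
      have hnil : ((pvPairs.map F).filter (fun dp => dp.contains 0)).map
          (fun dp => dp.getD 0 0) = [] := by
        rcases hh : ((pvPairs.map F).filter (fun dp => dp.contains 0)).map
          (fun dp => dp.getD 0 0) with _ | ⟨y, t⟩
        · exact hh
        · exfalso
          apply hno
          have hy : y ∈ rValidL n l := hhit_dec y (by rw [hh]; exact List.mem_cons_self)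
          exact List.ne_nil_of_mem hy
      rw [hnil]
      simp only [List.length_nil, gt_iff_lt, lt_irrefl, if_false]
      have hzip : pvPairs.zip (pvPairs.map F) = pvPairs.map (fun p => (p, F p)) := by
        have hz := @List.zip_map' _ _ _ id F pvPairs
        rw [List.map_id] at hz
        exact hz
      rw [hzip, PySem.List.foldl_append_singleton_eq_map, List.nil_append, List.map_map]
      have hmapeq : (pvPairs.map ((fun pd => pvBStep n pd.1.1 pd.1.2 pd.2) ∘ (fun p => (p, F p)))) =
          pvPairs.map (fun p => pvBStep n p.1 p.2 (F p)) := rfl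
      rw [hmapeq]
      exact ih (l+1) (fun p => pvBStep n p.1 p.2 (F p)) (by omega) (by omega) (by omega)
        (fun p hpm => relD_step n p.1 p.2 hn (by rw [Prod.mk.eta]; exact hpm) l h1 (F p) (hrel p hpm))

theorem pvBSmallest_eq (n : Int) (hn : 1 ≤ n) : pvBSmallest n = rMin n (rL n) := by
  unfold pvBSmallest
  rw [PySem.List.foldl_append_singleton_eq_map, List.nil_append]
  exact pvBLoop_eq n hn (n.toNat + 2) 1 (fun p => pvBInit n p.1 p.2) (le_refl 1)
    (rL_pos n hn) (by have := rL_le n hn; omega)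
    (fun p hpm => relD_init n p.1 p.2 (by rw [Prod.mk.eta]; exact hpm))

-- ===== VERDICT (by name: the statement is the Claim_ definition above) =====
theorem euler_714_spec : Claim_equal_euler_714 := by
  intro N _
  unfold Spec_euler_714
  rw [euler_714_eq]
  unfold euler_714_alt
  exact PySem.List.foldl_congr_mem' _ _ _ _ (by
    intro x hx acc
    have h1 : 1 ≤ x := (PySem.List.mem_pyRange_one.1 hx).1
    rw [pvBSmallest_eq x h1])
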